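-- pv_equiv track=rewrite | github.com/BernhardtMilan/MultiLeagueSheduling | real_world_like_input/data.py | reshape_to_schedule
-- ===== SOURCE A (Python) =====
-- DAYS = ["Monday", "Tuesday", "Wednesday", "Thursday", "Friday"]
--
-- SLOTS = ["17:00-18:00", "18:00-19:00", "19:00-20:00", "20:00-21:00", "21:00-22:00", "22:00-23:00"]
--
-- def reshape_to_schedule(values):
--     schedule = {}
--     for i, day in enumerate(DAYS):
--         schedule[day] = {}
--         for j, slot in enumerate(SLOTS):
--             idx = i * 6 + j
--             if idx < len(values):
--                 val = values[idx]
--                 schedule[day][slot] = -2 if val == 0 else val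
--             else:
--                 schedule[day][slot] = -2
--     return schedule
-- ===== SOURCE B (Python) =====
-- DAYS = ["Monday", "Tuesday", "Wednesday", "Thursday", "Friday"]
--
-- SLOTS = ["17:00-18:00", "18:00-19:00", "19:00-20:00", "20:00-21:00", "21:00-22:00", "22:00-23:00"]
--
-- def reshape_to_schedule(values):
--     n = len(values)
--     cells = [values[i] if i < n and values[i] != 0 else -2 for i in range(30)]
--     rows = [cells[k:k + 6] for k in range(0, 30, 6)]
--     return {day: dict(zip(SLOTS, row)) for day, row in zip(DAYS, rows)}
-- ===== Notes on version B (the rewrite author's own statement) =====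
-- stated objective: alternative
-- what changed: Replaces A's nested enumerate loops that fill a dict-of-dicts cell by cell via idx = i*6+j with a normalise-then-chunk-then-zip pipeline: build the flat list of 30 normalised cells, slice it into five rows of six, and zip rows with DAYS and cells with SLOTS.
import Mathlib
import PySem

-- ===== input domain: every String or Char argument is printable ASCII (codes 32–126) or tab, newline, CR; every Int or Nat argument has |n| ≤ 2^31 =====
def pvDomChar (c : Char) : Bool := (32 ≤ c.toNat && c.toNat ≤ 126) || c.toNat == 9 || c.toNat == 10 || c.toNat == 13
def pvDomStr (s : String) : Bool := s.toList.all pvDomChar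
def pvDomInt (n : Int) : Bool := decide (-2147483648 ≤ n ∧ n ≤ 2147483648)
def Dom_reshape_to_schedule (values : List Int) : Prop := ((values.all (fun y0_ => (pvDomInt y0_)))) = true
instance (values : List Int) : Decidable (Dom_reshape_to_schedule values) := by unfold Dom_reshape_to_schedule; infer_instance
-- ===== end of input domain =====

-- B reorganises A's nested index-arithmetic dict-building loops into a normalise → chunk → zip pipeline (objective: alternative decomposition, same cost).

def pvDAYS : List String := ["Monday", "Tuesday", "Wednesday", "Thursday", "Friday"]

def pvSLOTS : List String := ["17:00-18:00", "18:00-19:00", "19:00-20:00", "20:00-21:00", "21:00-22:00", "22:00-23:00"]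

-- ===== PORT A =====
-- nested enumerate loops over DAYS and SLOTS, building a dict of dicts at idx = i*6+j;
-- values[idx] is exact as pyGetD here because the guard ensures 0 ≤ idx < len(values).
def reshape_to_schedule (values : List Int) : List (String × List (String × Int)) :=
  ((PySem.List.enumerate pvDAYS).foldl (fun schedule (p : Int × String) =>
    let schedule := schedule.insert p.2 (PySem.Dict.empty : PySem.Dict String Int)
    (PySem.List.enumerate pvSLOTS).foldl (fun schedule (q : Int × String) =>
      let idx := p.1 * 6 + q.1
      if idx < (values.length : Int) then
        let val := PySem.List.pyGetD values idx 0
        schedule.modify p.2 PySem.Dict.empty (fun inner => inner.insert q.2 (if val = 0 then -2 else val))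
      else
        schedule.modify p.2 PySem.Dict.empty (fun inner => inner.insert q.2 (-2))
      ) schedule
    ) (PySem.Dict.empty : PySem.Dict String (PySem.Dict String Int))).items.map
      (fun r => (r.1, r.2.items))

-- ===== PORT B =====
-- normalise the first 30 positions into a flat cell list, chunk it into rows of 6, zip with DAYS/SLOTS;
-- values[i] is exact as pyGetD here because the guard ensures 0 ≤ i < len(values).
def reshape_to_schedule_alt (values : List Int) : List (String × List (String × Int)) :=
  let n : Int := values.length
  let cells := (PySem.List.pyRange 0 30 1).map (fun i =>
    if i < n ∧ PySem.List.pyGetD values i 0 ≠ 0 then PySem.List.pyGetD values i 0 else -2)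
  let rows := (PySem.List.pyRange 0 30 6).map (fun k => PySem.List.slice cells (some k) (some (k + 6)))
  (pvDAYS.zip rows).map (fun p => (p.1, pvSLOTS.zip p.2))

-- ===== PRECONDITION & SPEC =====
def Spec_reshape_to_schedule (values : List Int) (out : List (String × List (String × Int))) : Prop := out = reshape_to_schedule_alt values
instance (values : List Int) (out : List (String × List (String × Int))) : Decidable (Spec_reshape_to_schedule values out) := by unfold Spec_reshape_to_schedule; infer_instance

-- ===== CLAIM (what is proved, stated in full; the proofs are below) =====
def Claim_equal_reshape_to_schedule : Prop := ∀ (values : List Int), Dom_reshape_to_schedule values → Spec_reshape_to_schedule values (reshape_to_schedule values)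

-- ===== LEMMAS AND PROOFS =====

-- B-style cell value (proof-only abbreviation)
def pvBcell (values : List Int) (i : Int) : Int :=
  if i < (values.length : Int) ∧ PySem.List.pyGetD values i 0 ≠ 0 then PySem.List.pyGetD values i 0 else -2

theorem pv_en_slots : PySem.List.enumerate pvSLOTS =
    [(0, "17:00-18:00"), (1, "18:00-19:00"), (2, "19:00-20:00"),
     (3, "20:00-21:00"), (4, "21:00-22:00"), (5, "22:00-23:00")] := by decide

theorem pv_en_days : PySem.List.enumerate pvDAYS =
    [(0, "Monday"), (1, "Tuesday"), (2, "Wednesday"), (3, "Thursday"), (4, "Friday")] := by decide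

-- hoist the range test of one loop step into the inserted value
theorem pv_hoist (c : Prop) [Decidable c] (sch : PySem.Dict String (PySem.Dict String Int))
    (day slot : String) (a b : Int) :
    (if c then sch.modify day PySem.Dict.empty (fun inner => inner.insert slot a)
     else sch.modify day PySem.Dict.empty (fun inner => inner.insert slot b))
    = sch.modify day PySem.Dict.empty (fun inner => inner.insert slot (if c then a else b)) := by
  split_ifs <;> rfl

-- A's nested conditional for one cell equals B's conjunctive one
theorem pv_cellB (values : List Int) (t : Int) :
    (if t < (values.length : Int) then
      (if PySem.List.pyGetD values t 0 = 0 then -2 else PySem.List.pyGetD values t 0)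
     else (-2 : Int)) = pvBcell values t := by
  unfold pvBcell
  split_ifs <;> simp_all

-- modifying the freshly inserted key rewrites its value in place
theorem pv_step {κ ν : Type} [BEq κ] [LawfulBEq κ] (s : PySem.Dict κ ν) (k : κ) (v : ν)
    (dflt : ν) (f : ν → ν) (h : s.contains k = false) :
    (s.insert k v).modify k dflt f = s.insert k (f v) := by
  have hmem : ∀ p ∈ s.items, (p.1 == k) = false := by
    intro p hp
    by_contra hq
    have hc : s.contains k = true := by
      unfold PySem.Dict.contains
      exact List.any_eq_true.mpr ⟨p, hp, by simpa using hq⟩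
    rw [hc] at h; exact Bool.noConfusion h
  have hfalse : (s.items.any fun p => p.1 == k) = false := by
    rw [List.any_eq_false]; intro p hp; simp [hmem p hp]
  have hins : s.insert k v = PySem.Dict.mk (s.items ++ [(k, v)]) := by
    unfold PySem.Dict.insert PySem.Dict.contains; rw [hfalse]; simp
  have h2 : List.map (fun p => if (p.1 == k) = true then (k, f v) else p) s.items = s.items := by
    conv_rhs => rw [← List.map_id s.items]
    exact List.map_congr_left (fun p hp => by simp [hmem p hp])
  unfold PySem.Dict.modify
  rw [PySem.Dict.getD_insert_self, hins]
  unfold PySem.Dict.insert PySem.Dict.contains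
  simp [hfalse, h2]

-- one full day: the inner loop over SLOTS fills the fresh day with its six cells
theorem pv_inner (values : List Int) (i : Int) (day : String)
    (s : PySem.Dict String (PySem.Dict String Int)) (h : s.contains day = false) :
    ((PySem.List.enumerate pvSLOTS).foldl (fun schedule (q : Int × String) =>
      let idx := i * 6 + q.1
      if idx < (values.length : Int) then
        let val := PySem.List.pyGetD values idx 0
        schedule.modify day PySem.Dict.empty (fun inner => inner.insert q.2 (if val = 0 then -2 else val))
      else
        schedule.modify day PySem.Dict.empty (fun inner => inner.insert q.2 (-2))
      ) (s.insert day PySem.Dict.empty))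
    = s.insert day (PySem.Dict.mk
        [("17:00-18:00", pvBcell values (i * 6 + 0)), ("18:00-19:00", pvBcell values (i * 6 + 1)),
         ("19:00-20:00", pvBcell values (i * 6 + 2)), ("20:00-21:00", pvBcell values (i * 6 + 3)),
         ("21:00-22:00", pvBcell values (i * 6 + 4)), ("22:00-23:00", pvBcell values (i * 6 + 5))]) := by
  rw [pv_en_slots]
  simp only [List.foldl_cons, List.foldl_nil]
  simp only [pv_hoist]
  rw [pv_step s day _ _ _ h, pv_step s day _ _ _ h, pv_step s day _ _ _ h,
      pv_step s day _ _ _ h, pv_step s day _ _ _ h, pv_step s day _ _ _ h]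
  refine congrArg (s.insert day) ?_
  simp only [pv_cellB]
  rfl

theorem pv_A_eq_B (values : List Int) : reshape_to_schedule values = reshape_to_schedule_alt values := by
  unfold reshape_to_schedule
  rw [pv_en_days]
  simp only [List.foldl_cons, List.foldl_nil]
  rw [pv_inner values 0 "Monday" PySem.Dict.empty (by rfl)]
  rw [pv_inner values 1 "Tuesday" _ (by rfl)]
  rw [pv_inner values 2 "Wednesday" _ (by rfl)]
  rw [pv_inner values 3 "Thursday" _ (by rfl)]
  rw [pv_inner values 4 "Friday" _ (by rfl)]
  rfl

-- ===== VERDICT (by name: the statement is the Claim_ definition above) =====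
theorem reshape_to_schedule_spec : Claim_equal_reshape_to_schedule := by
  intro values _
  unfold Spec_reshape_to_schedule
  exact pv_A_eq_B values
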